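-- pv_equiv track=rewrite | github.com/Gandharv2323/Phishing-Link-Detection-Project | app/url_feature_extractor.py | _longest_letter_sequence
-- ===== SOURCE A (Python) =====
-- def _longest_letter_sequence(text):
--     """Find the length of the longest consecutive letter sequence"""
--     if not text:
--         return 0
--     max_len = 0
--     current_len = 0
--     for c in text:
--         if c.isalpha():
--             current_len += 1
--             max_len = max(max_len, current_len)
--         else:
--             current_len = 0
--     return max_len
-- ===== SOURCE B (Python) =====
-- from itertools import groupby
--
-- def _longest_letter_sequence(text):
--     """Find the length of the longest consecutive letter sequence"""
--     return max((sum(1 for _ in g) for k, g in groupby(text, key=str.isalpha) if k),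
--                default=0)
-- ===== Notes on version B (the rewrite author's own statement) =====
-- stated objective: idiomatic
-- what changed: Replaced the explicit running-length counter with per-character max updates by an itertools.groupby decomposition: partition the text into maximal runs of equal alpha-status and take the max length of the letter runs with default=0.
import Mathlib
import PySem

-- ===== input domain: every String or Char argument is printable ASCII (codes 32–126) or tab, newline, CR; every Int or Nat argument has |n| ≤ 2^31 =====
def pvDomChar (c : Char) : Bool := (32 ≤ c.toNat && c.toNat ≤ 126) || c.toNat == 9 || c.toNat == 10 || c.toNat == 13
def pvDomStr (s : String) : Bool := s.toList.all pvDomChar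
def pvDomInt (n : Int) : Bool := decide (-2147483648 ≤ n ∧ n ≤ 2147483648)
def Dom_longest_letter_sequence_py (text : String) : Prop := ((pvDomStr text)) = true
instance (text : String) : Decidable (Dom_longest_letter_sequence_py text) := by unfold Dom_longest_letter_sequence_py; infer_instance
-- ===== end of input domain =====

-- B replaces A's running-counter/max-update loop by an itertools.groupby decomposition:
-- partition into maximal runs of equal alpha-status, then take the max length of the letter runs (default 0).

-- ===== PORT A =====
-- A's for-loop over the characters, state (max_len, current_len)
def pvLoopA : List Char → Int → Int → Int
  | [], maxLen, _ => maxLen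
  | c :: cs, maxLen, curLen =>
      if PySem.Chars.isalpha c then
        pvLoopA cs (max maxLen (curLen + 1)) (curLen + 1)
      else
        pvLoopA cs maxLen 0

def longest_letter_sequence_py (text : String) : Int :=
  if text = "" then 0
  else pvLoopA text.toList 0 0

-- ===== PORT B =====
-- groupby's grouping step: take the maximal prefix whose chars have alpha-status b
def pvSpan (b : Bool) : List Char → Nat × List Char
  | [] => (0, [])
  | c :: cs =>
      if PySem.Chars.isalpha c = b then
        let p := pvSpan b cs
        (p.1 + 1, p.2)
      else
        (0, c :: cs)

theorem pvSpan_len_le (b : Bool) : ∀ cs : List Char, (pvSpan b cs).2.length ≤ cs.length := by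
  intro cs
  induction cs with
  | nil => simp [pvSpan]
  | cons c cs ih =>
      by_cases h : PySem.Chars.isalpha c = b
      · simp only [pvSpan, h, if_true, List.length_cons]
        omega
      · simp [pvSpan, h]

-- itertools.groupby(text, key=str.isalpha): list of (key, run length)
def pvGroups : List Char → List (Bool × Nat)
  | [] => []
  | c :: cs =>
      let b := PySem.Chars.isalpha c
      let p := pvSpan b cs
      (b, p.1 + 1) :: pvGroups p.2
termination_by l => l.length
decreasing_by
  simpa using Nat.lt_succ_of_le (pvSpan_len_le _ cs)

-- max(…, default=0) over the letter groups
def pvMaxGroups (gs : List (Bool × Nat)) : Int :=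
  gs.foldl (fun acc g => if g.1 then max acc (g.2 : Int) else acc) 0

def longest_letter_sequence_py_alt (text : String) : Int :=
  pvMaxGroups (pvGroups text.toList)

-- ===== PRECONDITION & SPEC =====
def Spec_longest_letter_sequence_py (text : String) (out : Int) : Prop := out = longest_letter_sequence_py_alt text
instance (text : String) (out : Int) : Decidable (Spec_longest_letter_sequence_py text out) := by unfold Spec_longest_letter_sequence_py; infer_instance

-- ===== CLAIM (what is proved, stated in full; the proofs are below) =====
def Claim_equal_longest_letter_sequence_py : Prop := ∀ (text : String), Dom_longest_letter_sequence_py text → Spec_longest_letter_sequence_py text (longest_letter_sequence_py text)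

-- ===== LEMMAS AND PROOFS =====

-- the best "value reachable from here" of A's scan, with current run length cur
def pvG : List Char → Int → Int
  | [], _ => 0
  | c :: cs, cur =>
      if PySem.Chars.isalpha c then max (cur + 1) (pvG cs (cur + 1))
      else pvG cs 0

theorem pvG_nonneg : ∀ (l : List Char) (cur : Int), 0 ≤ pvG l cur := by
  intro l
  induction l with
  | nil => intro cur; simp [pvG]
  | cons c cs ih =>
      intro cur
      by_cases h : PySem.Chars.isalpha c = true <;> simp [pvG, h]
      · exact Or.inr (ih _)
      · exact ih 0

theorem pvLoopA_eq : ∀ (l : List Char) (maxLen cur : Int), 0 ≤ maxLen →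
    pvLoopA l maxLen cur = max maxLen (pvG l cur) := by
  intro l
  induction l with
  | nil => intro m c hm; simp [pvLoopA, pvG]; omega
  | cons ch cs ih =>
      intro m c hm
      by_cases h : PySem.Chars.isalpha ch = true <;> simp only [pvLoopA, pvG, h, if_true, if_false, Bool.false_eq_true]
      · rw [ih _ _ (by omega)]
        omega
      · exact ih _ _ hm

theorem pvSpan_cons_eq (b : Bool) (c : Char) (cs : List Char) (h : PySem.Chars.isalpha c = b) :
    pvSpan b (c :: cs) = ((pvSpan b cs).1 + 1, (pvSpan b cs).2) := by
  simp [pvSpan, h]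

theorem pvSpan_cons_ne (b : Bool) (c : Char) (cs : List Char) (h : ¬ PySem.Chars.isalpha c = b) :
    pvSpan b (c :: cs) = (0, c :: cs) := by
  simp [pvSpan, h]

theorem pvG_span_true : ∀ (cs : List Char) (cur : Int), 0 ≤ cur →
    max cur (pvG cs cur) = max (cur + ((pvSpan true cs).1 : Int)) (pvG (pvSpan true cs).2 0) := by
  intro cs
  induction cs with
  | nil =>
      intro cur h
      simp only [pvSpan, pvG]
      omega
  | cons c cs ih =>
      intro cur h
      by_cases hc : PySem.Chars.isalpha c = true
      · rw [pvSpan_cons_eq true c cs hc]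
        have hg : pvG (c :: cs) cur = max (cur + 1) (pvG cs (cur + 1)) := by simp [pvG, hc]
        rw [hg]
        have hih := ih (cur + 1) (by omega)
        push_cast at hih ⊢
        omega
      · rw [pvSpan_cons_ne true c cs hc]
        have hcf : PySem.Chars.isalpha c = false := by simpa using hc
        have hg : pvG (c :: cs) cur = pvG cs 0 := by simp [pvG, hcf]
        have hg2 : pvG (c :: cs) 0 = pvG cs 0 := by simp [pvG, hcf]
        have h0 := pvG_nonneg cs 0
        rw [hg, hg2]
        omega

theorem pvG_span_false : ∀ (cs : List Char),
    pvG cs 0 = pvG (pvSpan false cs).2 0 := by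
  intro cs
  induction cs with
  | nil => simp [pvSpan]
  | cons c cs ih =>
      by_cases hc : PySem.Chars.isalpha c = true
      · rw [pvSpan_cons_ne false c cs (by simp [hc])]
      · have hcf : PySem.Chars.isalpha c = false := by simpa using hc
        rw [pvSpan_cons_eq false c cs hcf]
        have hg : pvG (c :: cs) 0 = pvG cs 0 := by simp [pvG, hcf]
        rw [hg]
        exact ih

theorem pvFoldl_init : ∀ (gs : List (Bool × Nat)) (a : Int), 0 ≤ a →
    gs.foldl (fun acc g => if g.1 then max acc (g.2 : Int) else acc) a
      = max a (gs.foldl (fun acc g => if g.1 then max acc (g.2 : Int) else acc) 0) := by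
  intro gs
  induction gs with
  | nil => intro a ha; simp; omega
  | cons g gs ih =>
      intro a ha
      simp only [List.foldl_cons]
      by_cases hg : g.1 = true <;> simp only [hg, if_true, if_false, Bool.false_eq_true]
      · rw [ih (max a (g.2 : Int)) (by positivity), ih (max 0 (g.2 : Int)) (by positivity)]
        omega
      · rw [ih a ha]

theorem pvMaxGroups_cons_true (n : Nat) (gs : List (Bool × Nat)) :
    pvMaxGroups ((true, n) :: gs) = max (n : Int) (pvMaxGroups gs) := by
  simp only [pvMaxGroups, List.foldl_cons, if_true]
  rw [pvFoldl_init gs (max 0 (n : Int)) (by positivity)]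
  omega

theorem pvMaxGroups_cons_false (n : Nat) (gs : List (Bool × Nat)) :
    pvMaxGroups ((false, n) :: gs) = pvMaxGroups gs := by
  simp [pvMaxGroups]

theorem pvGroups_cons (c : Char) (cs : List Char) :
    pvGroups (c :: cs) =
      (PySem.Chars.isalpha c, (pvSpan (PySem.Chars.isalpha c) cs).1 + 1)
        :: pvGroups (pvSpan (PySem.Chars.isalpha c) cs).2 := by
  rw [pvGroups]

theorem pvG_eq_maxGroups : ∀ (n : Nat) (l : List Char), l.length ≤ n →
    pvG l 0 = pvMaxGroups (pvGroups l) := by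
  intro n
  induction n with
  | zero =>
      intro l h
      have hl : l = [] := by cases l <;> simp_all
      subst hl
      simp [pvG, pvGroups, pvMaxGroups]
  | succ n ih =>
      intro l h
      match l with
      | [] => simp [pvG, pvGroups, pvMaxGroups]
      | c :: cs =>
        have hlen : cs.length ≤ n := by simpa using h
        by_cases hc : PySem.Chars.isalpha c = true
        · rw [pvGroups_cons, hc, pvMaxGroups_cons_true]
          rw [← ih (pvSpan true cs).2 (le_trans (pvSpan_len_le true cs) hlen)]
          have hg : pvG (c :: cs) 0 = max 1 (pvG cs 1) := by simp [pvG, hc]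
          have hsp := pvG_span_true cs 1 (by omega)
          have h1 := pvG_nonneg cs 1
          rw [hg]
          push_cast at hsp ⊢
          omega
        · have hcf : PySem.Chars.isalpha c = false := by simpa using hc
          rw [pvGroups_cons, hcf, pvMaxGroups_cons_false]
          rw [← ih (pvSpan false cs).2 (le_trans (pvSpan_len_le false cs) hlen)]
          have hg : pvG (c :: cs) 0 = pvG cs 0 := by simp [pvG, hcf]
          rw [hg]
          exact pvG_span_false cs

-- ===== VERDICT (by name: the statement is the Claim_ definition above) =====
theorem longest_letter_sequence_py_spec : Claim_equal_longest_letter_sequence_py := by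
  intro text _
  unfold Spec_longest_letter_sequence_py longest_letter_sequence_py longest_letter_sequence_py_alt
  by_cases h : text = ""
  · subst h
    simp [pvGroups, pvMaxGroups]
  · rw [if_neg h, pvLoopA_eq _ _ _ le_rfl,
        pvG_eq_maxGroups text.toList.length text.toList le_rfl, pvMaxGroups]
    have h0 : (0:Int) ≤ pvMaxGroups (pvGroups text.toList) := by
      rw [← pvG_eq_maxGroups text.toList.length text.toList le_rfl]
      exact pvG_nonneg _ _
    rw [pvMaxGroups] at h0
    omega
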